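-- pv_equiv track=rewrite | github.com/carozziandrea/AdventOfCode2025 | Day03/day03.py | get_largest_subsequence
-- ===== SOURCE A (Python) =====
-- def get_largest_subsequence(digits_list, k):
--     stack = []
--     drop_count = len(digits_list) - k
--
--     for digit in digits_list:
--         while stack and digit > stack[-1] and drop_count > 0:
--             stack.pop()
--             drop_count -= 1
--         stack.append(digit)
--
--     return stack[:k]
-- ===== SOURCE B (Python) =====
-- def get_largest_subsequence(digits_list, k):
--     # Recursive windowed-maxima selection instead of a monotonic stack.
--     # For k < 0 (a nonsensical request) this returns [], whereas A returns a
--     # trimmed fully-popped stack; stated as an intended difference (D_).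
--     n = len(digits_list)
--     if k <= 0:
--         return []
--     if k >= n:
--         return digits_list[:]
--     window = digits_list[: n - k + 1]
--     m = max(window)
--     i = window.index(m)
--     return [m] + get_largest_subsequence(digits_list[i + 1:], k - 1)
-- ===== Notes on version B (the rewrite author's own statement) =====
-- stated objective: alternative
-- what changed: Replaces the single-pass monotonic stack with budgeted pops by a recursive windowed-maxima selection: pick the first maximum of digits_list[: n-k+1], then recurse on the remainder with k-1.
-- intended difference: For negative k where A's fully-popped stack still has more than -k suffix-maximum entries, A returns that stack with its last -k elements sliced off (an artefact of Python's negative slicing), while B returns [], the intended value for a request of non-positive length. — e.g. on get_largest_subsequence([3, 2, 1], -1): A returns [3, 2], B returns []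
import Mathlib
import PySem

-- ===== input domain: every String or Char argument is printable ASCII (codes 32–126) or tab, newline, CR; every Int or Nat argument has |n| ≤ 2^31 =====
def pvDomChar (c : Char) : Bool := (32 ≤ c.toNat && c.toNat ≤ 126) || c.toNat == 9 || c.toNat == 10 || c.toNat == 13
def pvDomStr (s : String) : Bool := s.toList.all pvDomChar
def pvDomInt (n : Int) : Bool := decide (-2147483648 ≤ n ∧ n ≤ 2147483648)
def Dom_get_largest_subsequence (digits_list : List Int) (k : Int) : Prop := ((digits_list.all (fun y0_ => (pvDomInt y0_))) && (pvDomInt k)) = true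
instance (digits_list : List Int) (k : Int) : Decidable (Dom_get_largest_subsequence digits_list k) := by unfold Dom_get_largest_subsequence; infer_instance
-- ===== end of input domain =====

-- B replaces A's single-pass monotonic stack by a recursive windowed-maxima selection
-- (an alternative decomposition; for k < 0 B returns [] — stated as D_ below).
-- ===== PORT A =====
-- the 'while stack and digit > stack[-1] and drop_count > 0:' loop; fuel = stack length
-- is a pure totality device (the loop pops at most the whole stack)
def aPop : Nat → List Int → Int → Int → List Int × Int
  | 0, stack, dropc, _ => (stack, dropc)
  | fuel + 1, stack, dropc, digit =>
    if h : stack = [] then (stack, dropc)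
    else if digit > stack.getLast h ∧ 0 < dropc then aPop fuel stack.dropLast (dropc - 1) digit
    else (stack, dropc)

def get_largest_subsequence (digits_list : List Int) (k : Int) : List Int :=
  let res := digits_list.foldl
    (fun (st : List Int × Int) digit =>
      ((aPop st.1.length st.1 st.2 digit).1 ++ [digit], (aPop st.1.length st.1 st.2 digit).2))
    ([], (digits_list.length : Int) - k)
  PySem.List.slice res.1 none (some k)


-- ===== PORT B =====
-- fuel = digits_list.length + 1 bounds Source B's recursion depth (each call drops ≥ 1 element)
def altGo : Nat → List Int → Int → List Int
  | 0, _, _ => []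
  | fuel + 1, digits_list, k =>
    if k ≤ 0 then []
    else if (digits_list.length : Int) ≤ k then digits_list
    else
      let window := PySem.List.slice digits_list none (some ((digits_list.length : Int) - k + 1))
      match PySem.List.max? window (fun y => y) with
      | none => []
      | some m =>
        match PySem.List.index? window m with
        | none => []
        | some i =>
          m :: altGo fuel (PySem.List.slice digits_list (some ((i : Int) + 1)) none) (k - 1)

def get_largest_subsequence_alt (digits_list : List Int) (k : Int) : List Int :=
  altGo (digits_list.length + 1) digits_list k


-- ===== PRECONDITION & SPEC =====
-- For negative k where A's fully-popped stack still has more than -k suffix-maximum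
-- entries, A returns that stack with its last -k elements sliced off (an artefact of
-- Python's negative slicing), while B returns [], the intended value for a request of
-- non-positive length.
def D_get_largest_subsequence (digits_list : List Int) (k : Int) : Prop :=
  k < 0 ∧ -k < ((digits_list.tails.countP
    (fun t => match t with | [] => false | x :: r => r.all (fun y => decide (y ≤ x))) : Nat) : Int)
instance (digits_list : List Int) (k : Int) : Decidable (D_get_largest_subsequence digits_list k) := by
  unfold D_get_largest_subsequence; infer_instance

def Spec_get_largest_subsequence (digits_list : List Int) (k : Int) (out : List Int) : Prop :=
  ¬ D_get_largest_subsequence digits_list k → out = get_largest_subsequence_alt digits_list k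
instance (digits_list : List Int) (k : Int) (out : List Int) : Decidable (Spec_get_largest_subsequence digits_list k out) := by
  unfold Spec_get_largest_subsequence; infer_instance

def pvDiffWitness_get_largest_subsequence : List Int × Int := ([3, 2, 1], -1)
def pvDiffWitnessOut_get_largest_subsequence : (List Int) × (List Int) := ([3, 2], [])

-- ===== CLAIM =====
def Claim_unchanged_get_largest_subsequence : Prop := ∀ (digits_list : List Int) (k : Int), Dom_get_largest_subsequence digits_list k → Spec_get_largest_subsequence digits_list k (get_largest_subsequence digits_list k)
def Claim_changed_get_largest_subsequence : Prop := Dom_get_largest_subsequence (pvDiffWitness_get_largest_subsequence.1) (pvDiffWitness_get_largest_subsequence.2) ∧ D_get_largest_subsequence (pvDiffWitness_get_largest_subsequence.1) (pvDiffWitness_get_largest_subsequence.2) ∧ get_largest_subsequence (pvDiffWitness_get_largest_subsequence.1) (pvDiffWitness_get_largest_subsequence.2) = pvDiffWitnessOut_get_largest_subsequence.1 ∧ get_largest_subsequence_alt (pvDiffWitness_get_largest_subsequence.1) (pvDiffWitness_get_largest_subsequence.2) = pvDiffWitnessOut_get_largest_subsequence.2 ∧ pvDiffWitnessOut_get_largest_subsequence.1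 ≠ pvDiffWitnessOut_get_largest_subsequence.2
def Claim_exact_get_largest_subsequence : Prop := ∀ (digits_list : List Int) (k : Int), Dom_get_largest_subsequence digits_list k → D_get_largest_subsequence digits_list k → get_largest_subsequence digits_list k ≠ get_largest_subsequence_alt digits_list k

-- ===== LEMMAS AND PROOFS =====
-- reversed-stack (top-first) model of A's loop, used only in the proofs
def popR : List Int → Int → Int → List Int × Int
  | [], d, _ => ([], d)
  | t :: r, d, y => if y > t ∧ 0 < d then popR r (d - 1) y else (t :: r, d)

def stepR (st : List Int × Int) (y : Int) : List Int × Int :=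
  (y :: (popR st.1 st.2 y).1, (popR st.1 st.2 y).2)

lemma popR_d (r : List Int) : ∀ (d y : Int),
    (popR r d y).2 = d - r.length + ((popR r d y).1.length : Int) := by
  induction r with
  | nil => intro d y; simp [popR]
  | cons t tl ih =>
    intro d y
    by_cases h : y > t ∧ 0 < d
    · simp only [popR, if_pos h]; rw [ih]; simp only [List.length_cons]; push_cast; ring
    · simp only [popR, if_neg h]; ring

lemma popR_mem (r : List Int) : ∀ (d y x : Int), x ∈ (popR r d y).1 → x ∈ r := by
  induction r with
  | nil => intro d y x hx; simp [popR] at hx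
  | cons t tl ih =>
    intro d y x hx
    by_cases h : y > t ∧ 0 < d
    · simp only [popR, if_pos h] at hx; exact List.mem_cons_of_mem _ (ih _ _ _ hx)
    · simpa only [popR, if_neg h] using hx

lemma popR_all (r : List Int) : ∀ (d y : Int), (∀ x ∈ r, x < y) → (r.length : Int) ≤ d →
    popR r d y = ([], d - r.length) := by
  induction r with
  | nil => intro d y _ _; simp [popR]
  | cons t tl ih =>
    intro d y hall hd
    simp only [List.length_cons] at hd
    have hc : y > t ∧ 0 < d := ⟨hall t (by simp), by push_cast at hd ⊢; omega⟩
    simp only [popR, if_pos hc]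
    rw [ih _ _ (fun x hx => hall x (List.mem_cons_of_mem _ hx)) (by push_cast at hd ⊢; omega)]
    simp; ring

lemma popR_append (r : List Int) : ∀ (d y : Int) (s : List Int), (popR r d y).1 ≠ [] →
    popR (r ++ s) d y = ((popR r d y).1 ++ s, (popR r d y).2) := by
  induction r with
  | nil => intro d y s h; simp [popR] at h
  | cons t tl ih =>
    intro d y s h
    by_cases hc : y > t ∧ 0 < d
    · simp only [popR, if_pos hc] at h ⊢
      simp only [List.cons_append, popR, if_pos hc]
      exact ih _ _ _ h
    · simp only [popR, if_neg hc]
      simp only [List.cons_append, popR, if_neg hc]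

lemma popR_push_m (r : List Int) : ∀ (d y m : Int), (popR r d y).1 = [] →
    (0 < (popR r d y).2 → y ≤ m) → popR (r ++ [m]) d y = ([m], (popR r d y).2) := by
  induction r with
  | nil =>
    intro d y m _ hm
    simp only [popR] at hm ⊢
    simp only [List.nil_append, popR]
    by_cases hd : 0 < d
    · have : ¬ (y > m ∧ 0 < d) := by
        intro ⟨h1, _⟩; exact absurd (hm hd) (not_le.mpr h1)
      rw [if_neg this]
    · rw [if_neg (by tauto)]
  | cons t tl ih =>
    intro d y m h hm
    by_cases hc : y > t ∧ 0 < d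
    · simp only [popR, if_pos hc] at h hm ⊢
      simp only [List.cons_append, popR, if_pos hc]
      exact ih _ _ _ h hm
    · simp only [popR, if_neg hc] at h
      exact absurd h (List.cons_ne_nil t tl)

lemma popR_stop (r : List Int) : ∀ (d y : Int), (r.length : Int) < d →
    (popR r d y).1 = [] ∨ ∃ t rest, (popR r d y).1 = t :: rest ∧ y ≤ t := by
  induction r with
  | nil => intro d y _; left; simp [popR]
  | cons t tl ih =>
    intro d y hd
    simp only [List.length_cons] at hd
    by_cases hc : y > t ∧ 0 < d
    · simp only [popR, if_pos hc]
      exact ih _ _ (by push_cast at hd ⊢; omega)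
    · simp only [popR, if_neg hc]
      right
      refine ⟨t, tl, rfl, ?_⟩
      have hd0 : 0 < d := by push_cast at hd; omega
      rcases not_and_or.mp hc with h | h
      · exact not_lt.mp h
      · exact absurd hd0 h

lemma popR_sorted (r : List Int) : ∀ (d y : Int), r.Pairwise (· ≤ ·) →
    (popR r d y).1.Pairwise (· ≤ ·) := by
  induction r with
  | nil => intro d y _; simp [popR]
  | cons t tl ih =>
    intro d y hs
    by_cases hc : y > t ∧ 0 < d
    · simp only [popR, if_pos hc]; exact ih _ _ (List.Pairwise.of_cons hs)
    · simp only [popR, if_neg hc]; exact hs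

lemma run_d (ys : List Int) : ∀ (s : List Int) (d : Int),
    (ys.foldl stepR (s, d)).2
      = d - s.length - ys.length + ((ys.foldl stepR (s, d)).1.length : Int) := by
  induction ys with
  | nil => intro s d; simp
  | cons y ys ih =>
    intro s d
    simp only [List.foldl_cons, List.length_cons]
    rw [show stepR (s, d) y = (y :: (popR s d y).1, (popR s d y).2) from rfl, ih]
    have := popR_d s d y
    simp only [List.length_cons] at this ⊢
    push_cast at this ⊢
    omega

lemma run_mem (ys : List Int) : ∀ (s : List Int) (d : Int) (x : Int),
    x ∈ (ys.foldl stepR (s, d)).1 → x ∈ s ∨ x ∈ ys := by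
  induction ys with
  | nil => intro s d x hx; left; simpa using hx
  | cons y ys ih =>
    intro s d x hx
    simp only [List.foldl_cons] at hx
    rcases ih _ _ _ hx with h | h
    · rcases List.mem_cons.mp h with h | h
      · right; simp [h]
      · exact Or.inl (popR_mem _ _ _ _ h)
    · right; exact List.mem_cons_of_mem _ h

lemma run_bottom (ys : List Int) : ∀ (r : List Int) (d m : Int),
    (∀ (t : Nat), t < ys.length → (t : Int) < d - r.length → ys.getD t 0 ≤ m) →
    ys.foldl stepR (r ++ [m], d)
      = ((ys.foldl stepR (r, d)).1 ++ [m], (ys.foldl stepR (r, d)).2) := by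
  induction ys with
  | nil => intro r d m _; simp
  | cons y ys ih =>
    intro r d m hyp
    simp only [List.foldl_cons]
    have hstep : stepR (r ++ [m], d) y = ((stepR (r, d) y).1 ++ [m], (stepR (r, d) y).2) := by
      by_cases hne : (popR r d y).1 = []
      · have hm : 0 < (popR r d y).2 → y ≤ m := by
          intro hpos
          rw [popR_d, hne] at hpos
          simpa using hyp 0 (by simp) (by simpa using hpos)
        rw [show stepR (r ++ [m], d) y = (y :: (popR (r ++ [m]) d y).1, (popR (r ++ [m]) d y).2) from rfl,
            popR_push_m r d y m hne hm]
        simp [stepR, hne]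
      · rw [show stepR (r ++ [m], d) y = (y :: (popR (r ++ [m]) d y).1, (popR (r ++ [m]) d y).2) from rfl,
            popR_append r d y [m] hne]
        simp [stepR]
    rw [hstep]
    rcases hs : stepR (r, d) y with ⟨s', d'⟩
    apply ih
    intro t ht htd
    have hd' : d' = d - r.length + ((popR r d y).1.length : Int) := by
      have := popR_d r d y
      rw [show stepR (r, d) y = (y :: (popR r d y).1, (popR r d y).2) from rfl] at hs
      cases hs; assumption
    have hs' : s'.length = (popR r d y).1.length + 1 := by
      rw [show stepR (r, d) y = (y :: (popR r d y).1, (popR r d y).2) from rfl] at hs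
      cases hs; simp
    have := hyp (t + 1) (by simpa using ht) (by push_cast [hs', hd'] at htd ⊢; omega)
    simpa using this

lemma popR_nonpos (r : List Int) (d y : Int) (h : d ≤ 0) : popR r d y = (r, d) := by
  cases r with
  | nil => simp [popR]
  | cons t tl => simp only [popR]; rw [if_neg (fun hx => absurd hx.2 (by omega))]

lemma run_nonpos (ys : List Int) : ∀ (s : List Int) (d : Int), d ≤ 0 →
    ys.foldl stepR (s, d) = (ys.reverse ++ s, d) := by
  induction ys with
  | nil => intro s d _; simp
  | cons y ys ih =>
    intro s d hd
    simp only [List.foldl_cons]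
    rw [show stepR (s, d) y = (y :: (popR s d y).1, (popR s d y).2) from rfl,
        popR_nonpos s d y hd, ih (y :: s) d hd]
    simp

lemma run_sorted (ys : List Int) : ∀ (s : List Int) (d : Int), s.Pairwise (· ≤ ·) →
    (s.length : Int) + ys.length ≤ d → (ys.foldl stepR (s, d)).1.Pairwise (· ≤ ·) := by
  induction ys with
  | nil => intro s d hs _; simpa using hs
  | cons y ys ih =>
    intro s d hs hd
    simp only [List.length_cons] at hd
    simp only [List.foldl_cons]
    rw [show stepR (s, d) y = (y :: (popR s d y).1, (popR s d y).2) from rfl]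
    have hsort : (y :: (popR s d y).1).Pairwise (· ≤ ·) := by
      have hp := popR_sorted s d y hs
      rcases popR_stop s d y (by push_cast at hd ⊢; omega) with h | ⟨t, rest, heq, hyt⟩
      · rw [h]; simp
      · rw [heq] at hp ⊢
        rw [List.pairwise_cons] at hp
        rw [List.pairwise_cons]
        refine ⟨?_, List.pairwise_cons.mpr hp⟩
        intro b hb
        rcases List.mem_cons.mp hb with rfl | hb
        · exact hyt
        · exact le_trans hyt (hp.1 b hb)

    apply ih _ _ hsort
    have hpd := popR_d s d y
    simp only [List.length_cons]
    push_cast at hd ⊢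
    omega

def suffMaxList : List Int → List Int
  | [] => []
  | x :: t => if t.all (fun y => decide (y ≤ x)) then x :: suffMaxList t else suffMaxList t

lemma countP_tails (xs : List Int) :
    xs.tails.countP (fun t => match t with | [] => false | x :: r => r.all (fun y => decide (y ≤ x)))
      = (suffMaxList xs).length := by
  induction xs with
  | nil => simp [suffMaxList]
  | cons x t ih =>
    rw [List.tails_cons, List.countP_cons, ih]
    by_cases h : t.all (fun y => decide (y ≤ x))
    · simp [suffMaxList, h]
    · simp [suffMaxList, h]

lemma suffMaxList_del (l : List Int) (z y : Int) (rest : List Int) (h : z < y) :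
    suffMaxList (l ++ z :: y :: rest) = suffMaxList (l ++ y :: rest) := by
  induction l with
  | nil =>
    simp only [List.nil_append, suffMaxList]
    rw [if_neg (by
      simp only [List.all_cons, Bool.and_eq_true, decide_eq_true_eq, not_and]
      intro h'; exact absurd h' (not_le.mpr h))]
  | cons a l ih =>
    simp only [List.cons_append, suffMaxList]
    have hcond : ((l ++ z :: y :: rest).all (fun w => decide (w ≤ a)))
        = ((l ++ y :: rest).all (fun w => decide (w ≤ a))) := by
      by_cases hy : y ≤ a
      · have hz : z ≤ a := le_of_lt (lt_of_lt_of_le h hy)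
        simp [List.all_append, hy, hz]
      · simp [List.all_append, hy]
    rw [hcond, ih]

lemma popR_suffdel (r : List Int) : ∀ (d y : Int) (rest : List Int),
    suffMaxList ((popR r d y).1.reverse ++ y :: rest) = suffMaxList (r.reverse ++ y :: rest) := by
  induction r with
  | nil => intro d y rest; simp [popR]
  | cons t tl ih =>
    intro d y rest
    by_cases hc : y > t ∧ 0 < d
    · simp only [popR, if_pos hc]
      rw [ih]
      rw [List.reverse_cons, List.append_assoc, List.singleton_append]
      exact (suffMaxList_del tl.reverse t y rest hc.1).symm
    · simp only [popR, if_neg hc]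

lemma run_suff (ys : List Int) : ∀ (s : List Int) (d : Int),
    suffMaxList ((ys.foldl stepR (s, d)).1.reverse ) = suffMaxList (s.reverse ++ ys) := by
  induction ys with
  | nil => intro s d; simp
  | cons y ys ih =>
    intro s d
    simp only [List.foldl_cons]
    rw [show stepR (s, d) y = (y :: (popR s d y).1, (popR s d y).2) from rfl, ih]
    rw [List.reverse_cons, List.append_assoc, List.singleton_append]
    rw [popR_suffdel]

lemma suffMaxList_of_antitone (l : List Int) (h : l.Pairwise (fun a b => b ≤ a)) :
    suffMaxList l = l := by
  induction l with
  | nil => rfl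
  | cons x t ih =>
    rw [List.pairwise_cons] at h
    simp only [suffMaxList]
    rw [if_pos (by simp; exact h.1), ih h.2]

lemma stack_neg (xs : List Int) (d : Int) (hd : (xs.length : Int) < d) :
    (xs.foldl stepR ([], d)).1.reverse = suffMaxList xs := by
  have hsort := run_sorted xs [] d (by simp) (by simpa using le_of_lt hd)
  have hsuff := run_suff xs [] d
  simp only [List.reverse_nil, List.nil_append] at hsuff
  rw [← hsuff]
  rw [suffMaxList_of_antitone _ (by rw [List.pairwise_reverse]; exact hsort)]

lemma aPop_reverse (r : List Int) : ∀ (fuel : Nat) (d y : Int), r.length ≤ fuel →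
    aPop fuel r.reverse d y = ((popR r d y).1.reverse, (popR r d y).2) := by
  induction r with
  | nil =>
    intro fuel d y _
    cases fuel <;> simp [aPop, popR]
  | cons t tl ih =>
    intro fuel d y hf
    simp only [List.length_cons] at hf
    obtain ⟨f, rfl⟩ : ∃ f, fuel = f + 1 := ⟨fuel - 1, by omega⟩
    rw [show (t :: tl).reverse = tl.reverse ++ [t] by simp]
    rw [aPop]
    rw [dif_neg (by simp)]
    have hlast : (tl.reverse ++ [t]).getLast (by simp) = t := List.getLast_concat ..
    rw [hlast]
    by_cases hc : y > t ∧ 0 < d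
    · rw [if_pos hc, List.dropLast_concat, ih f (d - 1) y (by omega)]
      simp only [popR, if_pos hc]
    · rw [if_neg hc]
      simp only [popR, if_neg hc]
      simp

lemma run_reverse (ys : List Int) : ∀ (s : List Int) (d : Int),
    ys.foldl (fun (st : List Int × Int) digit =>
        ((aPop st.1.length st.1 st.2 digit).1 ++ [digit], (aPop st.1.length st.1 st.2 digit).2)) (s.reverse, d)
      = ((ys.foldl stepR (s, d)).1.reverse, (ys.foldl stepR (s, d)).2) := by
  induction ys with
  | nil => intro s d; simp
  | cons y ys ih =>
    intro s d
    simp only [List.foldl_cons]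
    have h1 : aPop s.reverse.length s.reverse d y = ((popR s d y).1.reverse, (popR s d y).2) := by
      rw [List.length_reverse]; exact aPop_reverse s s.length d y le_rfl
    rw [show stepR (s, d) y = (y :: (popR s d y).1, (popR s d y).2) from rfl]
    have h2 : (popR s d y).1.reverse ++ [y] = (y :: (popR s d y).1).reverse := by simp
    calc List.foldl _ ((aPop s.reverse.length s.reverse d y).1 ++ [y], (aPop s.reverse.length s.reverse d y).2) ys
        = List.foldl (fun (st : List Int × Int) digit =>
            ((aPop st.1.length st.1 st.2 digit).1 ++ [digit], (aPop st.1.length st.1 st.2 digit).2))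
            ((y :: (popR s d y).1).reverse, (popR s d y).2) ys := by rw [h1, ← h2]
      _ = _ := ih (y :: (popR s d y).1) (popR s d y).2

lemma A_char (xs : List Int) (k : Int) :
    get_largest_subsequence xs k
      = PySem.List.slice ((xs.foldl stepR ([], (xs.length : Int) - k)).1.reverse) none (some k) := by
  unfold get_largest_subsequence
  have := run_reverse xs [] ((xs.length : Int) - k)
  simp only [List.reverse_nil] at this
  rw [this]

lemma altGo_fuel : ∀ (f : Nat) (xs : List Int) (k : Int) (g : Nat), xs.length < f → xs.length < g →
    altGo f xs k = altGo g xs k := by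
  intro f
  induction f with
  | zero => intro xs k g hf; omega
  | succ f ihf =>
    intro xs k g hf hg
    obtain ⟨g', rfl⟩ : ∃ g', g = g' + 1 := ⟨g - 1, by omega⟩
    simp only [altGo]
    split_ifs with h1 h2
    · rfl
    · rfl
    · cases hmax : PySem.List.max? (PySem.List.slice xs none (some ((xs.length : Int) - k + 1))) (fun y => y) with
      | none => dsimp only
      | some m =>
        dsimp only
        cases hidx : PySem.List.index? (PySem.List.slice xs none (some ((xs.length : Int) - k + 1))) m with
        | none => dsimp only
        | some i =>
          dsimp only
          congr 1
          have hys : (PySem.List.slice xs (some ((i : Int) + 1)) none).length < xs.length := by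
            rw [PySem.List.slice_from _ (by positivity)]
            have h0 : 0 < xs.length := by omega
            have : ((i : Int) + 1).toNat = i + 1 := by omega
            simp [List.length_drop, this]; omega
          exact ihf _ _ _ (by omega) (by omega)

lemma alt_unfold (xs : List Int) (k : Int) :
    get_largest_subsequence_alt xs k =
      if k ≤ 0 then []
      else if (xs.length : Int) ≤ k then xs
      else match PySem.List.max? (PySem.List.slice xs none (some ((xs.length : Int) - k + 1))) (fun y => y) with
        | none => []
        | some m => match PySem.List.index? (PySem.List.slice xs none (some ((xs.length : Int) - k + 1))) m with
          | none => []
          | some i => m :: get_largest_subsequence_alt (PySem.List.slice xs (some ((i : Int) + 1)) none) (k - 1) := by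
  conv_lhs => unfold get_largest_subsequence_alt altGo
  split_ifs with h1 h2
  · rfl
  · rfl
  · cases hmax : PySem.List.max? (PySem.List.slice xs none (some ((xs.length : Int) - k + 1))) (fun y => y) with
    | none => simp only [hmax]
    | some m =>
      simp only [hmax]
      cases hidx : PySem.List.index? (PySem.List.slice xs none (some ((xs.length : Int) - k + 1))) m with
      | none => simp only []
      | some i =>
        simp only []
        congr 1
        have hys : (PySem.List.slice xs (some ((i : Int) + 1)) none).length < xs.length := by
          rw [PySem.List.slice_from _ (by positivity)]
          have h0 : 0 < xs.length := by omega
          have : ((i : Int) + 1).toNat = i + 1 := by omega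
          simp [List.length_drop, this]; omega
        exact altGo_fuel _ _ _ _ (by omega) (by omega)


lemma main_nonneg : ∀ (N : Nat) (xs : List Int) (k : Int), xs.length ≤ N → 0 ≤ k →
    get_largest_subsequence xs k = get_largest_subsequence_alt xs k := by
  intro N
  induction N with
  | zero =>
    intro xs k hN hk
    have hnil : xs = [] := List.eq_nil_of_length_eq_zero (by omega)
    subst hnil
    rw [A_char, alt_unfold]
    simp only [List.foldl_nil, List.reverse_nil, List.length_nil]
    rw [PySem.List.slice_to _ hk, List.take_nil]
    split_ifs with h1 h2
    · rfl
    · rfl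
    · simp at h2; omega
  | succ N ih =>
    intro xs k hN hk
    by_cases hk0 : k ≤ 0
    · have hk0' : k = 0 := le_antisymm hk0 hk
      subst hk0'
      rw [A_char, alt_unfold]
      rw [PySem.List.slice_to _ le_rfl]
      simp
    by_cases hfull : (xs.length : Int) ≤ k
    · rw [A_char, alt_unfold, if_neg hk0, if_pos hfull]
      rw [run_nonpos xs [] _ (by omega)]
      simp only [List.append_nil, List.reverse_reverse]
      rw [PySem.List.slice_to _ hk]
      exact List.take_of_length_le (by omega)
    · -- main case: 0 < k < xs.length
      have hkpos : 0 < k := lt_of_not_ge hk0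
      have hlen : k < (xs.length : Int) := lt_of_not_ge hfull
      rw [A_char, alt_unfold, if_neg hk0, if_neg hfull]
      set n := xs.length with hn
      have hkn1 : 1 ≤ k.toNat := by omega
      have hknn : k.toNat < n := by omega
      have hwn : ((n : Int) - k + 1).toNat = n - k.toNat + 1 := by omega
      set w := PySem.List.slice xs none (some ((n : Int) - k + 1)) with hw
      have hwtake : w = xs.take (n - k.toNat + 1) := by
        rw [hw, PySem.List.slice_to _ (by omega), hwn]
      have hwlen : w.length = n - k.toNat + 1 := by
        rw [hwtake, List.length_take]; omega
      have hwne : w ≠ [] := by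
        intro h; rw [h] at hwlen; simp at hwlen
      obtain ⟨m, hm⟩ : ∃ m, PySem.List.max? w (fun y => y) = some m := by
        cases hmx : PySem.List.max? w (fun y => y) with
        | none => exact absurd ((PySem.List.max?_eq_none_iff w (fun y => y)).mp hmx) hwne
        | some m => exact ⟨m, rfl⟩
      have hmmax : ∀ y ∈ w, y ≤ m := fun y hy => PySem.List.max?_isMax hm y hy
      obtain ⟨i, hi⟩ : ∃ i, PySem.List.index? w m = some i :=
        Option.isSome_iff_exists.mp ((PySem.List.index?_isSome_iff w m).mpr (PySem.List.max?_mem hm))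
      obtain ⟨hilen, hwim, hipre⟩ := PySem.List.getElem_of_index?_eq_some hi
      simp only [hm, hi]
      have hile : i ≤ n - k.toNat := by omega
      have hiln : i < n := by omega
      have hxim : xs[i]'hiln = m := by
        simpa only [hwtake, List.getElem_take] using hwim
      have hys : PySem.List.slice xs (some ((i : Int) + 1)) none = xs.drop (i + 1) := by
        have ht : ((i : Int) + 1).toNat = i + 1 := by omega
        rw [PySem.List.slice_from _ (by positivity), ht]
      rw [hys]
      set ys := xs.drop (i + 1) with hysdef
      have hyslen : ys.length = n - (i + 1) := by rw [hysdef, List.length_drop]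
      have hfold : xs.foldl stepR ([], (n : Int) - k)
          = ys.foldl stepR ((xs.take (i + 1)).foldl stepR ([], (n : Int) - k)) := by
        conv_lhs => rw [show xs = xs.take (i+1) ++ ys from (List.take_append_drop _ _).symm]
        rw [List.foldl_append]
      have htakei : xs.take (i + 1) = xs.take i ++ [m] := by
        rw [List.take_add_one]
        simp [List.getElem?_eq_getElem hiln, hxim]
      set G := (xs.take i).foldl stepR ([], (n : Int) - k) with hG
      have htklen : (xs.take i).length = i := by simp [List.length_take]; omega
      have hGd : G.2 = (n : Int) - k - i + G.1.length := by
        rw [hG, run_d]; rw [htklen]; simp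
      have hGlt : ∀ x ∈ G.1, x < m := by
        intro x hx
        rcases run_mem _ _ _ _ hx with h | h
        · simp at h
        · obtain ⟨j, hj, hjx⟩ := List.mem_iff_getElem.mp h
          rw [htklen] at hj
          have hjn : j < n := lt_trans hj hiln
          have hxj : xs[j]'hjn = x := by
            rw [← hjx]; simp [List.getElem_take]
          have hjw : j < w.length := by omega
          have hwj : w[j]'hjw = xs[j]'hjn := by
            simp only [hwtake, List.getElem_take]
          have hne := hipre j hj
          have hle := hmmax (w[j]'hjw) (List.getElem_mem _)
          rw [hwj, hxj] at hne hle
          exact lt_of_le_of_ne hle hne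
      have hGlen : (G.1.length : Int) ≤ G.2 := by
        rw [hGd]
        have : (i : Int) ≤ (n : Int) - k := by omega
        omega
      have hstep : (xs.take (i + 1)).foldl stepR ([], (n : Int) - k) = ([m], (n : Int) - k - i) := by
        rw [htakei, List.foldl_append]
        rw [← hG]
        show stepR G m = _
        rw [show stepR G m = (m :: (popR G.1 G.2 m).1, (popR G.1 G.2 m).2) from rfl]
        rw [popR_all G.1 G.2 m hGlt hGlen]
        refine Prod.ext rfl ?_
        show G.2 - (G.1.length : Int) = (n : Int) - k - i
        rw [hGd]; ring
      set H := ys.foldl stepR ([], (n : Int) - k - i) with hHdef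
      have hH : ys.foldl stepR ([m], (n : Int) - k - i) = (H.1 ++ [m], H.2) := by
        have hb := run_bottom ys [] ((n : Int) - k - i) m ?_
        · simpa [← hHdef] using hb
        · intro t ht htd
          simp only [List.length_nil, Nat.cast_zero, sub_zero] at htd
          have hidx2 : i + 1 + t < n := by omega
          have hgd : ys.getD t 0 = xs[i + 1 + t]'hidx2 := by
            rw [List.getD_eq_getElem _ _ ht]
            simp only [hysdef, List.getElem_drop]
          have hjw : i + 1 + t < w.length := by omega
          have hwj : w[i + 1 + t]'hjw = xs[i + 1 + t]'hidx2 := by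
            simp only [hwtake, List.getElem_take]
          rw [hgd, ← hwj]
          exact hmmax _ (List.getElem_mem _)
      have hstack : xs.foldl stepR ([], (n : Int) - k) = (H.1 ++ [m], H.2) := by
        rw [hfold, hstep, hH]
      rw [hstack]
      simp only [List.reverse_append, List.reverse_cons, List.reverse_nil, List.nil_append,
        List.singleton_append]
      rw [PySem.List.slice_to _ hk]
      rw [show k.toNat = (k.toNat - 1) + 1 by omega, List.take_succ_cons]
      congr 1
      rw [← ih ys (k - 1) (by omega) (by omega)]
      rw [A_char]
      rw [show ((ys.length : Int) - (k - 1)) = (n : Int) - k - i by rw [hyslen]; omega]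
      rw [← hHdef, PySem.List.slice_to _ (by omega)]
      congr 1
      omega

lemma alt_nonpos (xs : List Int) (k : Int) (hk : k ≤ 0) : get_largest_subsequence_alt xs k = [] := by
  rw [alt_unfold, if_pos hk]

lemma A_neg (xs : List Int) (k : Int) (hk : k < 0) :
    get_largest_subsequence xs k
      = (suffMaxList xs).take ((suffMaxList xs).length - (-k).toNat) := by
  rw [A_char, stack_neg xs _ (by omega)]
  conv_lhs => rw [show k = -(((-k).toNat : Nat) : Int) by omega]
  rw [PySem.List.slice_to_neg_natCast (suffMaxList xs) (-k).toNat (by omega)]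

lemma main_neg (xs : List Int) (k : Int) (hk : k < 0)
    (hc : ((xs.tails.countP (fun t => match t with | [] => false | x :: r => r.all (fun y => decide (y ≤ x))) : Nat) : Int) ≤ -k) :
    get_largest_subsequence xs k = [] := by
  rw [A_neg xs k hk]
  have hcnt := countP_tails xs
  rw [show (suffMaxList xs).length - (-k).toNat = 0 by omega, List.take_zero]

lemma main_neg_ne (xs : List Int) (k : Int) (hk : k < 0)
    (hc : -k < ((xs.tails.countP (fun t => match t with | [] => false | x :: r => r.all (fun y => decide (y ≤ x))) : Nat) : Int)) :
    get_largest_subsequence xs k ≠ [] := by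
  rw [A_neg xs k hk]
  have hcnt := countP_tails xs
  apply List.ne_nil_of_length_pos
  rw [List.length_take]
  omega

-- ===== VERDICT =====
theorem get_largest_subsequence_spec : Claim_unchanged_get_largest_subsequence := by
  intro xs k hDom hnD
  show get_largest_subsequence xs k = get_largest_subsequence_alt xs k
  rcases (by omega : 0 ≤ k ∨ k < 0) with hk | hk
  · exact main_nonneg xs.length xs k le_rfl hk
  · have hc : ((xs.tails.countP (fun t => match t with | [] => false | x :: r => r.all (fun y => decide (y ≤ x))) : Nat) : Int) ≤ -k := by
      by_contra hgt
      exact hnD ⟨hk, by omega⟩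
    rw [main_neg xs k hk hc, alt_nonpos xs k (le_of_lt hk)]

theorem get_largest_subsequence_changed : Claim_changed_get_largest_subsequence := by
  unfold Claim_changed_get_largest_subsequence; decide

theorem get_largest_subsequence_tight : Claim_exact_get_largest_subsequence := by
  intro xs k hDom hD
  obtain ⟨hk, hc⟩ := hD
  rw [alt_nonpos xs k (le_of_lt hk)]
  exact main_neg_ne xs k hk hc
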